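-- pv_equiv track=rewrite | github.com/heitzes/Algorithm | 프로그래머스/unrated/161989. 덧칠하기/덧칠하기.py | solution
-- ===== SOURCE A (Python) =====
-- from bisect import bisect_left
-- from collections import deque
--
-- def solution(n, m, section):
--     answer = 1
--     start = 0
--     section = deque(section)
--     while True:
--         sec = section[start]
--         ind = bisect_left(section, sec+m)
--         if ind == len(section):
--             break
--         answer += 1
--         start = ind
--
--     return answer
-- ===== SOURCE B (Python) =====
-- def solution(n, m, section):
--     # single left-to-right sweep instead of repeated bisect jumps
--     answer = 0
--     painted_until = section[0]  # first section is never covered yet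
--     for s in section:
--         if s >= painted_until:
--             answer += 1
--             painted_until = s + m
--     return answer
-- ===== Notes on version B (the rewrite author's own statement) =====
-- stated objective: simpler
-- what changed: B replaces A's while-loop of bisect_left jumps over a deque with a single left-to-right sweep that keeps a painted_until bound and paints whenever the next section is uncovered.
-- outside the precondition, e.g. on solution(1, 1, [1, 3, 0, 4]): A returns 2, B returns 3; on solution(5, 0, [0, 1]): A does not finish within the time limit, B returns 2; on solution(1, 1, []): A raises IndexError, B raises IndexError
import Mathlib
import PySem

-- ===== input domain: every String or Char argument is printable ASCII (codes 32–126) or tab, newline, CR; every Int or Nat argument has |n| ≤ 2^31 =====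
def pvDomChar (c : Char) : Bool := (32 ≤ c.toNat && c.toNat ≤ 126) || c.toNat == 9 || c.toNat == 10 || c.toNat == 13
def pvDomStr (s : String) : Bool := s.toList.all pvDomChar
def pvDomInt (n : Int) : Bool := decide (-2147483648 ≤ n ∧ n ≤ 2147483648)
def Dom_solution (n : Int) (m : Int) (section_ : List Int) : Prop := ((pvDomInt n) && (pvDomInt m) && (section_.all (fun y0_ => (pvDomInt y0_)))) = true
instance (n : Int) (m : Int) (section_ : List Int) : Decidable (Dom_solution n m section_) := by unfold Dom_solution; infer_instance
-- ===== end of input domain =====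

-- B replaces A's bisect_left jump loop with a single linear sweep tracking painted_until (objective: simpler).


-- ===== PORT A =====
-- A's `while True` loop; fuel = section length suffices inside Pre_ (start strictly
-- increases each iteration); fuel 0 returns the current answer (unreached inside Pre_).
def solutionLoop (section_ : List Int) (m : Int) : Nat → Nat → Int → Int
  | 0, _, answer => answer
  | fuel+1, start, answer =>
    let sec := section_.getD start 0      -- section[start]; always in range inside Pre_
    let ind := PySem.List.bisectLeft section_ (sec + m)
    if ind = section_.length then answer
    else solutionLoop section_ m fuel ind (answer + 1)

def solution (n : Int) (m : Int) (section_ : List Int) : Int :=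
  solutionLoop section_ m section_.length 0 1

-- ===== PORT B =====
-- loop body of B's `for s in section`
def sweepStep (m : Int) (st : Int × Int) (s : Int) : Int × Int :=
  if st.2 ≤ s then (st.1 + 1, s + m) else st

def solution_alt (n : Int) (m : Int) (section_ : List Int) : Int :=
  match section_ with
  | [] => 0          -- Python B raises IndexError at section[0] here; excluded by Pre_
  | s0 :: _ => (section_.foldl (sweepStep m) (0, s0)).1

-- ===== PRECONDITION & SPEC =====
-- Pre_ excludes: the empty list (both programs raise IndexError), m ≤ 0 (A's loop never
-- advances and diverges on sorted input), and unsorted lists — on which bisect_left's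
-- result, and hence A's answer, is meaningless (bisect's own documented precondition) —
-- except the one-paint ones whose every element lies below section[0] + m, where the
-- first bisect already reaches the end and both programs return 1 regardless of order.
def Pre_solution (n : Int) (m : Int) (section_ : List Int) : Prop :=
  section_ ≠ [] ∧ 1 ≤ m ∧
    (section_.Pairwise (· ≤ ·) ∨ ∀ y ∈ section_, y < section_.headD 0 + m)
instance (n : Int) (m : Int) (section_ : List Int) : Decidable (Pre_solution n m section_) := by unfold Pre_solution; infer_instance

def pvWitness_solution : Int × Int × List Int := (8, 4, [2, 4, 6])

def Spec_solution (n : Int) (m : Int) (section_ : List Int) (out : Int) : Prop := out = solution_alt n m section_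
instance (n : Int) (m : Int) (section_ : List Int) (out : Int) : Decidable (Spec_solution n m section_ out) := by unfold Spec_solution; infer_instance

-- ===== CLAIM (what is proved, stated in full; the proofs are below) =====
def Claim_equal_solution : Prop := ∀ (n : Int) (m : Int) (section_ : List Int), Dom_solution n m section_ → Pre_solution n m section_ → Spec_solution n m section_ (solution n m section_)

-- ===== LEMMAS AND PROOFS =====

-- skipped elements (< painted_until) leave the sweep state unchanged
lemma foldl_sweepStep_skip (m a p : Int) (pre suf : List Int)
    (h : ∀ y ∈ pre, y < p) :
    List.foldl (sweepStep m) (a, p) (pre ++ suf) = List.foldl (sweepStep m) (a, p) suf := by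
  induction pre with
  | nil => rfl
  | cons y ys ih =>
      have hy : y < p := h y (List.mem_cons_self ..)
      have hstep : sweepStep m (a, p) y = (a, p) := by
        simp [sweepStep, not_le.mpr hy]
      simpa [hstep] using ih (fun z hz => h z (List.mem_cons_of_mem _ hz))

-- A's loop from index `start` equals B's sweep over the remaining suffix
lemma solutionLoop_eq_sweep (xs : List Int) (m : Int)
    (hs : xs.Pairwise (· ≤ ·)) (hm : 1 ≤ m) :
    ∀ fuel start answer, start < xs.length → xs.length - start ≤ fuel →
      solutionLoop xs m fuel start answer
        = (List.foldl (sweepStep m) (answer, xs.getD start 0 + m) (xs.drop (start+1))).1 := by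
  intro fuel
  induction fuel with
  | zero => intro start answer h1 h2; omega
  | succ fuel ih =>
      intro start answer hstart hfuel
      have hgd : xs.getD start 0 = xs[start] := List.getD_eq_getElem xs 0 hstart
      obtain ⟨hle, hlt, hge⟩ := PySem.List.bisectLeft_spec xs (xs.getD start 0 + m) hs
      have hunfold : solutionLoop xs m (fuel+1) start answer
          = (if PySem.List.bisectLeft xs (xs.getD start 0 + m) = xs.length then answer
             else solutionLoop xs m fuel
               (PySem.List.bisectLeft xs (xs.getD start 0 + m)) (answer + 1)) := rfl
      set sec := xs.getD start 0 with hsec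
      set ind := PySem.List.bisectLeft xs (sec + m) with hind
      have hld : (xs.drop (start+1)).length = xs.length - (start+1) := by simp
      have hsi : start < ind := by
        by_contra hcon
        have hx : sec + m ≤ xs[start] := hge start hstart (by omega)
        rw [← hgd] at hx
        omega
      by_cases hbreak : ind = xs.length
      · -- A breaks; B skips every remaining element
        have hall : ∀ y ∈ xs.drop (start+1), y < sec + m := by
          intro y hy
          obtain ⟨j, hj, hjy⟩ := List.mem_iff_getElem.mp hy
          rw [List.getElem_drop] at hjy
          have hjlen : start + 1 + j < xs.length := by omega
          subst hjy
          exact hlt _ hjlen (by omega)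
        have hskip := foldl_sweepStep_skip m answer (sec + m) (xs.drop (start+1)) [] hall
        simp only [List.append_nil] at hskip
        rw [hunfold, if_pos hbreak, hskip]
        rfl
      · -- A jumps to ind; B skips the elements strictly between and paints xs[ind]
        have hindlen : ind < xs.length := lt_of_le_of_ne hle hbreak
        have hdecomp : xs.drop (start+1)
            = (xs.drop (start+1)).take (ind - (start+1)) ++ xs.drop ind := by
          have h1 : xs.drop ind = (xs.drop (start+1)).drop (ind - (start+1)) := by
            rw [List.drop_drop]
            congr 1
            omega
          rw [h1, List.take_append_drop]
        have hpre : ∀ y ∈ (xs.drop (start+1)).take (ind - (start+1)), y < sec + m := by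
          intro y hy
          obtain ⟨j, hj, hjy⟩ := List.mem_iff_getElem.mp hy
          simp only [List.length_take, hld] at hj
          rw [List.getElem_take, List.getElem_drop] at hjy
          have hjlen : start + 1 + j < xs.length := by omega
          subst hjy
          exact hlt _ hjlen (by omega)
        have hdropind : xs.drop ind = xs[ind] :: xs.drop (ind+1) :=
          List.drop_eq_getElem_cons hindlen
        have hpaint : sweepStep m (answer, sec + m) xs[ind] = (answer + 1, xs[ind] + m) := by
          simp [sweepStep, hge ind hindlen le_rfl]
        have hih := ih ind (answer + 1) hindlen (by omega)
        have hgdind : xs.getD ind 0 = xs[ind] := List.getD_eq_getElem xs 0 hindlen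
        rw [hunfold, if_neg hbreak, hih, hgdind, hdecomp,
          foldl_sweepStep_skip m answer (sec + m) _ _ hpre, hdropind,
          List.foldl_cons, hpaint]

-- if every element is below the target, the binary search runs off the right end
lemma bisectLeftLoop_all_lt (xs : List Int) (x : Int) (hall : ∀ y ∈ xs, y < x) :
    ∀ fuel lo hi, lo ≤ hi → hi ≤ xs.length → hi - lo ≤ fuel →
      PySem.List.bisectLeftLoop xs x fuel lo hi = hi := by
  intro fuel
  induction fuel with
  | zero => intro lo hi h1 h2 h3; simp [PySem.List.bisectLeftLoop]; omega
  | succ fuel ih =>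
      intro lo hi h1 h2 h3
      by_cases hlh : lo < hi
      · have hmid : (lo + hi) / 2 < xs.length := by omega
        have hsome : xs[(lo + hi) / 2]? = some xs[(lo + hi) / 2] :=
          List.getElem?_eq_getElem hmid
        have hy : xs[(lo + hi) / 2] < x := hall _ (List.getElem_mem hmid)
        simp only [PySem.List.bisectLeftLoop, if_pos hlh, hsome, if_pos hy]
        exact ih ((lo + hi) / 2 + 1) hi (by omega) h2 (by omega)
      · simp [PySem.List.bisectLeftLoop, hlh]; omega

lemma bisectLeft_all_lt (xs : List Int) (x : Int) (hall : ∀ y ∈ xs, y < x) :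
    PySem.List.bisectLeft xs x = xs.length :=
  bisectLeftLoop_all_lt xs x hall xs.length 0 xs.length (Nat.zero_le _) le_rfl (by omega)

-- one-paint case: every element below section[0] + m makes both programs return 1
lemma one_paint_case (m s0 : Int) (rest : List Int)
    (hall : ∀ y ∈ s0 :: rest, y < s0 + m) :
    solutionLoop (s0 :: rest) m (s0 :: rest).length 0 1 = 1
      ∧ (List.foldl (sweepStep m) (0, s0) (s0 :: rest)).1 = 1 := by
  constructor
  · have hbl : PySem.List.bisectLeft (s0 :: rest) ((s0 :: rest).getD 0 0 + m)
        = (s0 :: rest).length := by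
      exact bisectLeft_all_lt _ _ (by simpa using hall)
    show solutionLoop (s0 :: rest) m (rest.length + 1) 0 1 = 1
    have hunfold : solutionLoop (s0 :: rest) m (rest.length + 1) 0 1
        = (if PySem.List.bisectLeft (s0 :: rest) ((s0 :: rest).getD 0 0 + m)
              = (s0 :: rest).length then (1 : Int)
           else solutionLoop (s0 :: rest) m rest.length
             (PySem.List.bisectLeft (s0 :: rest) ((s0 :: rest).getD 0 0 + m)) 2) := rfl
    rw [hunfold, if_pos hbl]
  · have hrest : ∀ y ∈ rest, y < s0 + m := fun y hy => hall y (List.mem_cons_of_mem _ hy)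
    have hfirst : sweepStep m (0, s0) s0 = (1, s0 + m) := by simp [sweepStep]
    have hskip := foldl_sweepStep_skip m 1 (s0 + m) rest [] hrest
    simp only [List.append_nil] at hskip
    rw [List.foldl_cons, hfirst, hskip]
    rfl

-- ===== VERDICT (by name: the statement is the Claim_ definition above) =====
theorem solution_spec : Claim_equal_solution := by
  intro n m section_ hdom hpre
  obtain ⟨hne, hm, hsor | hall⟩ := hpre
  · unfold Spec_solution
    match section_, hne with
    | s0 :: rest, _ =>
      have hlen : 0 < (s0 :: rest).length := by simp
      have h := solutionLoop_eq_sweep (s0 :: rest) m hsor hm (s0 :: rest).length 0 1 hlen (by omega)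
      have hfirst : sweepStep m (0, s0) s0 = (1, s0 + m) := by simp [sweepStep]
      simp only [solution, solution_alt, h, List.getD, List.foldl_cons, hfirst]
      rfl
  · unfold Spec_solution
    match section_, hne with
    | s0 :: rest, _ =>
      obtain ⟨h1, h2⟩ := one_paint_case m s0 rest (by simpa using hall)
      show solutionLoop (s0 :: rest) m (s0 :: rest).length 0 1
        = ((s0 :: rest).foldl (sweepStep m) (0, s0)).1
      rw [h1, h2]
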